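-- pv_equiv track=rewrite | github.com/savannahjune/wbpractice | hackerranktest.py | stone_possibilities
-- ===== SOURCE A (Python) =====
-- def stone_possibilities(N, a, b):
--
-- 	a_mult = N - 1
-- 	b_mult = 0
--
-- 	counter = N
--
-- 	list_of_possibilities = []
--
-- 	while counter > 0:
-- 		possibility = (a * a_mult) + (b * b_mult)
-- 		if possibility not in list_of_possibilities:
-- 			list_of_possibilities.append(possibility)
-- 		a_mult = a_mult - 1
-- 		b_mult = b_mult + 1
-- 		counter = counter - 1
-- 	# print list_of_possibilities
-- 	sorted_list = sorted(list_of_possibilities)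
-- 	# print sorted_list
--
-- 	return sorted_list
-- ===== SOURCE B (Python) =====
-- def stone_possibilities(N, a, b):
--     base = a * (N - 1)
--     d = b - a
--     if d == 0:
--         return [base] if N > 0 else []
--     vals = [base + i * d for i in range(N)]
--     return vals if d > 0 else vals[::-1]
-- ===== Notes on version B (the rewrite author's own statement) =====
-- stated objective: faster
-- what changed: B replaces the quadratic membership-dedup loop plus final sort by a closed-form arithmetic-progression construction: the values are base + i*(b-a), already distinct and monotone, so B emits them directly (reversed when b-a < 0) and returns a singleton when b == a.
import Mathlib
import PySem

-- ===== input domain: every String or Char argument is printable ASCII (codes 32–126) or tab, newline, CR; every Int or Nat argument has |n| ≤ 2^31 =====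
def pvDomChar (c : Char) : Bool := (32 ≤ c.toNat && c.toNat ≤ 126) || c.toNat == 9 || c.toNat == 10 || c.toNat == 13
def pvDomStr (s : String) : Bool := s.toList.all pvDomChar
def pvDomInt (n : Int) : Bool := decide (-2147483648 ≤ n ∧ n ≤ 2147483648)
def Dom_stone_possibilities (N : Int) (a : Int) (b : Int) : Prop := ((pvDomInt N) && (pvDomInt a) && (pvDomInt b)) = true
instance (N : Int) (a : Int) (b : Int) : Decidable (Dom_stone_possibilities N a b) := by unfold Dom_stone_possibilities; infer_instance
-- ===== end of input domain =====

-- B builds the sorted distinct arithmetic progression in one pass instead of A's membership-dedup loop + sort (objective: faster).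

-- ===== PORT A =====
-- the while loop of A: state (a_mult, b_mult, counter, list_of_possibilities)
def stoneLoopA (a b a_mult b_mult counter : Int) (acc : List Int) : List Int :=
  if counter > 0 then
    let possibility := a * a_mult + b * b_mult
    let acc' := if possibility ∈ acc then acc else acc ++ [possibility]
    stoneLoopA a b (a_mult - 1) (b_mult + 1) (counter - 1) acc'
  else acc
termination_by counter.toNat
decreasing_by omega

def stone_possibilities (N : Int) (a : Int) (b : Int) : List Int :=
  PySem.List.sorted (stoneLoopA a b (N - 1) 0 N []) (fun x => x) false

-- ===== PORT B =====
def stone_possibilities_alt (N : Int) (a : Int) (b : Int) : List Int :=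
  let base := a * (N - 1)
  let d := b - a
  if d = 0 then (if N > 0 then [base] else [])
  else
    let vals := (PySem.List.pyRange 0 N 1).map (fun i => base + i * d)
    if d > 0 then vals else vals.reverse

-- ===== PRECONDITION & SPEC =====
def Spec_stone_possibilities (N : Int) (a : Int) (b : Int) (out : List Int) : Prop := out = stone_possibilities_alt N a b
instance (N : Int) (a : Int) (b : Int) (out : List Int) : Decidable (Spec_stone_possibilities N a b out) := by unfold Spec_stone_possibilities; infer_instance

-- ===== CLAIM (what is proved, stated in full; the proofs are below) =====
def Claim_equal_stone_possibilities : Prop := ∀ (N : Int) (a : Int) (b : Int), Dom_stone_possibilities N a b → Spec_stone_possibilities N a b (stone_possibilities N a b)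

-- ===== LEMMAS AND PROOFS =====

-- the sequence of values A's loop generates, counted by the Nat fuel n = counter.toNat
def prog (a b m k : Int) : Nat → List Int
  | 0 => []
  | n + 1 => (a * m + b * k) :: prog a b (m - 1) (k + 1) n

-- constant case b = a: every generated value is a*(m+k)
lemma stoneLoopA_const (a m k c : Int) (acc : List Int) :
    stoneLoopA a a m k c acc =
      if 0 < c then (if a * (m + k) ∈ acc then acc else acc ++ [a * (m + k)]) else acc := by
  by_cases hc : 0 < c
  · generalize hfuel : c.toNat = n
    induction n generalizing m k c acc with
    | zero => omega
    | succ n ih =>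
      rw [stoneLoopA]
      simp only [hc, if_pos]
      have hv : a * m + a * k = a * (m + k) := by ring
      by_cases hc' : 0 < c - 1
      · have := ih (m - 1) (k + 1) (c - 1)
          (if a * m + a * k ∈ acc then acc else acc ++ [a * m + a * k]) hc' (by omega)
        rw [this]
        have hv' : a * (m - 1 + (k + 1)) = a * (m + k) := by ring
        rw [hv', hv]
        by_cases hmem : a * (m + k) ∈ acc
        · simp [hmem]
        · simp [hmem]
      · rw [stoneLoopA]
        simp only [hc', if_false, hv]
  · rw [stoneLoopA]
    simp [hc]

-- every element of prog is (a*m+b*k) + j*(b-a) for some j ≥ 0; lower/upper bounds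
lemma prog_lb (a b m k : Int) (n : Nat) (hd : b - a > 0) :
    ∀ x ∈ prog a b m k n, a * m + b * k ≤ x := by
  induction n generalizing m k with
  | zero => simp [prog]
  | succ n ih =>
    intro x hx
    simp only [prog, List.mem_cons] at hx
    rcases hx with rfl | hx
    · exact le_refl _
    · have := ih (m - 1) (k + 1) x hx
      nlinarith

lemma prog_ub (a b m k : Int) (n : Nat) (hd : b - a < 0) :
    ∀ x ∈ prog a b m k n, x ≤ a * m + b * k := by
  induction n generalizing m k with
  | zero => simp [prog]
  | succ n ih =>
    intro x hx
    simp only [prog, List.mem_cons] at hx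
    rcases hx with rfl | hx
    · exact le_refl _
    · have := ih (m - 1) (k + 1) x hx
      nlinarith

lemma prog_pairwise_lt (a b m k : Int) (n : Nat) (hd : b - a > 0) :
    (prog a b m k n).Pairwise (· < ·) := by
  induction n generalizing m k with
  | zero => simp [prog]
  | succ n ih =>
    refine List.pairwise_cons.2 ⟨?_, ih (m - 1) (k + 1)⟩
    intro x hx
    have := prog_lb a b (m - 1) (k + 1) n hd x hx
    nlinarith

lemma prog_pairwise_gt (a b m k : Int) (n : Nat) (hd : b - a < 0) :
    (prog a b m k n).Pairwise (· > ·) := by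
  induction n generalizing m k with
  | zero => simp [prog]
  | succ n ih =>
    refine List.pairwise_cons.2 ⟨?_, ih (m - 1) (k + 1)⟩
    intro x hx
    have := prog_ub a b (m - 1) (k + 1) n hd x hx
    nlinarith

-- nodup case: the loop never finds a duplicate, so it appends everything
lemma stoneLoopA_nodup (a b m k c : Int) (acc : List Int)
    (hdisj : ∀ x ∈ prog a b m k c.toNat, x ∉ acc)
    (hnd : (prog a b m k c.toNat).Nodup) :
    stoneLoopA a b m k c acc = acc ++ prog a b m k c.toNat := by
  by_cases hc : 0 < c
  · generalize hfuel : c.toNat = n at hdisj hnd ⊢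
    induction n generalizing m k c acc with
    | zero => omega
    | succ n ih =>
      rw [stoneLoopA]
      simp only [hc, if_pos]
      simp only [prog] at hdisj hnd ⊢
      have hhead : a * m + b * k ∉ acc := hdisj _ (List.mem_cons_self ..)
      simp only [hhead, if_false]
      by_cases hc' : 0 < c - 1
      · have hdisj' : ∀ x ∈ prog a b (m - 1) (k + 1) n, x ∉ acc ++ [a * m + b * k] := by
          intro x hx
          simp only [List.mem_append, List.mem_singleton]
          push Not
          exact ⟨hdisj x (List.mem_cons_of_mem _ hx),
                 fun h => (List.nodup_cons.1 hnd).1 (h ▸ hx)⟩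
        rw [ih (m - 1) (k + 1) (c - 1) _ hc' (by omega) hdisj' (List.nodup_cons.1 hnd).2]
        simp
      · have hn0 : n = 0 := by omega
        subst hn0
        simp [prog]
        rw [stoneLoopA]
        simp only [if_neg (by omega : ¬ (c - 1 > 0))]
  · rw [stoneLoopA]
    have h0 : c.toNat = 0 := by omega
    rw [h0] at hdisj hnd ⊢
    simp [hc, prog]

-- prog is the map over the range
lemma prog_eq_map (a b m k : Int) (n : Nat) :
    prog a b m k n = (List.range n).map (fun j : Nat => a * m + b * k + (j : Int) * (b - a)) := by
  induction n generalizing m k with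
  | zero => simp [prog]
  | succ n ih =>
    rw [prog, ih, List.range_succ_eq_map, List.map_cons, List.map_map]
    refine congrArg₂ List.cons (by push_cast; ring) ?_
    apply List.map_congr_left
    intro j _
    simp only [Function.comp_apply]
    push_cast
    ring

lemma prog_start (a b N : Int) :
    prog a b (N - 1) 0 N.toNat =
      (PySem.List.pyRange 0 N 1).map (fun i => a * (N - 1) + i * (b - a)) := by
  rw [prog_eq_map, PySem.List.pyRange_one]
  simp only [Int.sub_zero, List.map_map]
  apply List.map_congr_left
  intro j _
  simp only [Function.comp_apply]
  ring

-- ===== VERDICT (by name: the statement is the Claim_ definition above) =====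
theorem stone_possibilities_spec : Claim_equal_stone_possibilities := by
  intro N a b _
  unfold Spec_stone_possibilities stone_possibilities stone_possibilities_alt
  by_cases hd : b - a = 0
  · -- constant case
    have hba : b = a := by omega
    subst hba
    simp only [hd, if_pos]
    rw [stoneLoopA_const]
    by_cases hN : 0 < N
    · have : b * (N - 1 + 0) = b * (N - 1) := by ring
      simp only [hN, if_pos, List.not_mem_nil, List.nil_append, this]
      rw [PySem.List.sorted_eq_self_of_pairwise]
      · simp
      · simp
    · simp only [hN, if_false]
      simp [PySem.List.sorted]
  · -- strict progression case
    simp only [hd, if_false]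
    have hloop := stoneLoopA_nodup a b (N - 1) 0 N []
    have hnd : (prog a b (N - 1) 0 N.toNat).Nodup := by
      rcases lt_or_gt_of_ne (fun h : b = a => hd (by omega)) with h | h
      · exact (prog_pairwise_gt a b (N - 1) 0 N.toNat (by omega)).nodup
      · exact (prog_pairwise_lt a b (N - 1) 0 N.toNat (by omega)).nodup
    rw [hloop (by simp) hnd, List.nil_append]
    rcases lt_or_gt_of_ne (fun h : b = a => hd (by omega)) with h | h
    · -- b < a, d < 0: B returns vals.reverse
      have hdneg : ¬ (b - a > 0) := by omega
      simp only [hdneg, if_false]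
      rw [← prog_start]
      apply PySem.List.sorted_id_eq_of_perm_of_pairwise
      · exact (List.reverse_perm _)
      · rw [List.pairwise_reverse]
        exact ((prog_pairwise_gt a b (N - 1) 0 N.toNat (by omega)).imp (fun h => le_of_lt h))
    · -- a < b, d > 0: B returns vals as is
      have hdpos : b - a > 0 := by omega
      simp only [hdpos, if_pos]
      rw [← prog_start]
      rw [PySem.List.sorted_eq_self_of_pairwise]
      exact ((prog_pairwise_lt a b (N - 1) 0 N.toNat hdpos).imp (fun h => le_of_lt h))
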